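-- pv_equiv track=rewrite | github.com/edenozery/MEM-Rearrange | MEM4_general.py | get_tandem_dict
-- ===== SOURCE A (Python) =====
-- def get_tandem_dict(tandem_indeces):
--     dict = {}
--     for repeat in tandem_indeces:
--         i = repeat[0]
--         cog = repeat[1]
--         if i not in dict:
--             dict[i] = []
--         dict[i].append(cog)
--     return dict
-- ===== SOURCE B (Python) =====
-- def get_tandem_dict(tandem_indeces):
--     seen = []
--     for repeat in tandem_indeces:
--         if repeat[0] not in seen:
--             seen.append(repeat[0])
--     return {i: [r[1] for r in tandem_indeces if r[0] == i] for i in seen}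
-- ===== Notes on version B (the rewrite author's own statement) =====
-- stated objective: alternative
-- what changed: Replaces the single-pass running dict-of-lists mutation with a two-pass scheme: first collect the distinct indices in first-occurrence order, then build each group by a filter comprehension over the whole list.
import Mathlib
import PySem

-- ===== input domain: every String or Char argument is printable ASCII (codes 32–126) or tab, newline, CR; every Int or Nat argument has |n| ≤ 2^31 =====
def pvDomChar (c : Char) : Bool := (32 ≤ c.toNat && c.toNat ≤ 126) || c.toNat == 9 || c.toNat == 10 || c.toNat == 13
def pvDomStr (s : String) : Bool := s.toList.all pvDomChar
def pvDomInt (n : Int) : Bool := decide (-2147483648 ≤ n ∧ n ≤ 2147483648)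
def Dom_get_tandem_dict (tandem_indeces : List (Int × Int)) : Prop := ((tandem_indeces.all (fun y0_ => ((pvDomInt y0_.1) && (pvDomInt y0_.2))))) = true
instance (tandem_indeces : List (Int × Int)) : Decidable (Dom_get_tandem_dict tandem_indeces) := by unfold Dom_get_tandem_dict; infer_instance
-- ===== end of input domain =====

-- B replaces A's one-pass running dict-of-lists with a two-pass scheme (distinct keys, then a
-- filter per key); same value, alternative decomposition (no speed claim).


-- ===== PORT A =====
-- literal transliteration of A: a dict built by 'if i not in dict: dict[i] = []' then
-- 'dict[i].append(cog)' (in-place append = modify), returned as its items list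
def get_tandem_dict (tandem_indeces : List (Int × Int)) : List (Int × List Int) :=
  (tandem_indeces.foldl (fun d repeat_ =>
      let i := repeat_.1
      let cog := repeat_.2
      let d := if d.contains i then d else d.insert i []
      d.modify i [] (fun l => l ++ [cog]))
    PySem.Dict.empty).items

-- ===== PORT B =====
def get_tandem_dict_alt (tandem_indeces : List (Int × Int)) : List (Int × List Int) :=
  let seen := tandem_indeces.foldl (fun seen repeat_ =>
      if seen.contains repeat_.1 then seen else seen ++ [repeat_.1]) []
  seen.map (fun i => (i, (tandem_indeces.filter (fun r => r.1 == i)).map (fun r => r.2)))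

-- ===== PRECONDITION & SPEC =====
def Spec_get_tandem_dict (tandem_indeces : List (Int × Int)) (out : List (Int × List Int)) : Prop := out = get_tandem_dict_alt tandem_indeces
instance (tandem_indeces : List (Int × Int)) (out : List (Int × List Int)) : Decidable (Spec_get_tandem_dict tandem_indeces out) := by unfold Spec_get_tandem_dict; infer_instance

-- ===== CLAIM (what is proved, stated in full; the proofs are below) =====
def Claim_equal_get_tandem_dict : Prop := ∀ (tandem_indeces : List (Int × Int)), Dom_get_tandem_dict tandem_indeces → Spec_get_tandem_dict tandem_indeces (get_tandem_dict tandem_indeces)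

-- ===== LEMMAS AND PROOFS =====

-- A's loop body (setdefault-style insert then append) equals a single 'modify i [] (· ++ [cog])'
theorem step_eq_modify (d : PySem.Dict Int (List Int)) (i : Int) (cog : Int) :
    (if d.contains i then d else d.insert i []).modify i [] (fun l => l ++ [cog])
      = d.modify i [] (fun l => l ++ [cog]) := by
  by_cases h : d.contains i = true
  · simp [h]
  · rw [Bool.not_eq_true] at h
    simp only [PySem.Dict.modify, h, Bool.false_eq_true, if_false]
    rw [PySem.Dict.getD_insert_self, PySem.Dict.insert_insert_self,
        PySem.Dict.getD_of_not_contains d [] h]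

theorem foldA_eq (tandem_indeces : List (Int × Int)) :
    (tandem_indeces.foldl (fun d repeat_ =>
        let i := repeat_.1
        let cog := repeat_.2
        let d := if d.contains i then d else d.insert i []
        d.modify i [] (fun l => l ++ [cog]))
      PySem.Dict.empty)
      = tandem_indeces.foldl (fun d p => d.modify p.1 [] (fun l => l ++ [p.2])) PySem.Dict.empty := by
  apply PySem.List.foldl_congr_mem
  intro d p _
  exact step_eq_modify d p.1 p.2

-- B's 'seen' loop is exactly set(first components) in first-insertion order
theorem seen_eq_ofList (tandem_indeces : List (Int × Int)) :
    tandem_indeces.foldl (fun seen repeat_ =>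
        if seen.contains repeat_.1 then seen else seen ++ [repeat_.1]) []
      = PySem.Set.ofList (tandem_indeces.map (fun r => r.1)) := by
  rw [← PySem.Set.update_nil_left, PySem.Set.update_map_eq_foldl_add]
  apply PySem.List.foldl_congr_mem
  intro s p _
  simp [PySem.Set.add]

-- ===== VERDICT (by name: the statement is the Claim_ definition above) =====
theorem get_tandem_dict_spec : Claim_equal_get_tandem_dict := by
  intro ts _
  unfold Spec_get_tandem_dict get_tandem_dict get_tandem_dict_alt
  rw [foldA_eq, seen_eq_ofList]
  set d := ts.foldl (fun d p => d.modify p.1 [] (fun l => l ++ [p.2])) PySem.Dict.empty with hd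
  have hnd : d.keys.Nodup := by
    rw [hd]
    exact PySem.Dict.nodup_keys_foldl_modify_key ts (fun p => p.1) [] (fun d p l => l ++ [p.2])
      PySem.Dict.empty (by simp [PySem.Dict.keys_empty])
  have hkeys : d.keys = PySem.Set.ofList (ts.map (fun r => r.1)) := by
    rw [hd]
    rw [PySem.Dict.keys_foldl_modify_key ts (fun p => p.1) [] (fun d p l => l ++ [p.2]) PySem.Dict.empty]
    simp [PySem.Dict.keys_empty, PySem.Set.update_nil_left]
  rw [PySem.Dict.items_eq_map_keys d hnd [], hkeys]
  apply List.map_congr_left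
  intro k _
  have := PySem.Dict.getD_foldl_modify_append ts PySem.Dict.empty k
  rw [hd]
  simp only [this, PySem.Dict.getD_empty, List.nil_append]
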